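-- pv_equiv track=rewrite | github.com/Ralf-Kemmann/Quantum-Spacetime-Bridge | scripts/run_bmc15_geometry_proxy_diagnostics.py | induced_components
-- ===== SOURCE A (Python) =====
-- from collections import defaultdict, deque
-- from typing import Any, Dict, List, Sequence, Set, Tuple
--
-- def induced_components(rows: Sequence[Dict[str, Any]], node_subset: Set[str]) -> Tuple[int, int]:
--     sub_edges = [r for r in rows if str(r["source"]) in node_subset and str(r["target"]) in node_subset]
--     if not node_subset:
--         return 0, 0
--     adj: Dict[str, Set[str]] = {n: set() for n in node_subset}
--     for r in sub_edges:
--         a = str(r["source"])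
--         b = str(r["target"])
--         adj[a].add(b)
--         adj[b].add(a)
--     seen: Set[str] = set()
--     sizes: List[int] = []
--     for start in sorted(node_subset):
--         if start in seen:
--             continue
--         q = deque([start])
--         seen.add(start)
--         size = 0
--         while q:
--             cur = q.popleft()
--             size += 1
--             for nxt in adj.get(cur, set()):
--                 if nxt not in seen:
--                     seen.add(nxt)
--                     q.append(nxt)
--         sizes.append(size)
--     return len(sizes), max(sizes) if sizes else 0
-- ===== SOURCE B (Python) =====
-- def induced_components(rows, node_subset):
--     # union-by-relabelling over the edge list: every subset node starts as its own
--     # label; each admissible edge merges the two labels by rewriting one to the other.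
--     label = {n: n for n in node_subset}
--     for r in rows:
--         a = str(r["source"])
--         if a not in label:
--             continue
--         b = str(r["target"])
--         if b not in label:
--             continue
--         la, lb = label[a], label[b]
--         if la != lb:
--             label = {n: (la if l == lb else l) for n, l in label.items()}
--     counts = {}
--     for n in node_subset:
--         counts[label[n]] = counts.get(label[n], 0) + 1
--     if not counts:
--         return 0, 0
--     return len(counts), max(counts.values())
-- ===== Notes on version B (the rewrite author's own statement) =====
-- stated objective: alternative
-- what changed: Replaces the sorted-start BFS flood-fill with adjacency sets and a queue by an edge-driven union-by-relabelling: each subset node starts as its own label, each admissible edge merges two labels, and the answer is read off a label tally.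
import Mathlib
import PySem

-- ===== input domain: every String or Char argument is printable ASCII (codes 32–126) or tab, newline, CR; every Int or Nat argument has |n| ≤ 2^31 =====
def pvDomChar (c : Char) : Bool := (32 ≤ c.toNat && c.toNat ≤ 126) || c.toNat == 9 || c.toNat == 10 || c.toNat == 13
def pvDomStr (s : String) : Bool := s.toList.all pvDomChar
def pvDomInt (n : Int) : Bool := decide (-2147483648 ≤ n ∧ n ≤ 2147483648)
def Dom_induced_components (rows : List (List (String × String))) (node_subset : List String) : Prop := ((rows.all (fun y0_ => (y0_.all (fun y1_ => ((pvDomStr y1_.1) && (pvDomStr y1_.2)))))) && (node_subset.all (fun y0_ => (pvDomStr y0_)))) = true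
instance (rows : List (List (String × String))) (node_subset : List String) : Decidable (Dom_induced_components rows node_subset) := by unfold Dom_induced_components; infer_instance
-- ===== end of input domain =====

-- B replaces A's sorted-start BFS flood-fill (adjacency sets + queue) by an edge-driven
-- union-by-relabelling with a final label tally; same result, no speed claim.

-- ===== PORT A =====
-- str(r[k]) for a row dict: total via default "" (Pre_ excludes the KeyError inputs)
def pvGetS (r : List (String × String)) (k : String) : String := (PySem.Dict.mk r).getD k ""

-- sub_edges = [r for r in rows if str(r["source"]) in node_subset and str(r["target"]) in node_subset]
def pvSubEdges (rows : List (List (String × String))) (S : List String) : List (List (String × String)) :=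
  rows.filter (fun r => S.contains (pvGetS r "source") && S.contains (pvGetS r "target"))

-- adj[a].add(b); adj[b].add(a)  for one row
def pvAdjStep (d : PySem.Dict String (PySem.Set String)) (r : List (String × String)) :
    PySem.Dict String (PySem.Set String) :=
  let a := pvGetS r "source"
  let b := pvGetS r "target"
  let d1 := d.insert a (PySem.Set.add (d.getD a PySem.Set.empty) b)
  d1.insert b (PySem.Set.add (d1.getD b PySem.Set.empty) a)

-- adj = {n: set() for n in node_subset}; for r in sub_edges: adj[a].add(b); adj[b].add(a)
def pvAdj (rows : List (List (String × String))) (S : List String) :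
    PySem.Dict String (PySem.Set String) :=
  (pvSubEdges rows S).foldl pvAdjStep
    (S.foldl (fun d n => d.insert n PySem.Set.empty) PySem.Dict.empty)

-- the while-q loop (the fuel only makes the recursion structural; the calls made never exhaust it)
def pvBfs (adj : PySem.Dict String (PySem.Set String)) :
    Nat → List String → PySem.Set String → Int → PySem.Set String × Int
  | 0, _, seen, size => (seen, size)
  | _ + 1, [], seen, size => (seen, size)
  | fuel + 1, cur :: q, seen, size =>
      let st := (adj.getD cur PySem.Set.empty).foldl
        (fun (p : PySem.Set String × List String) nxt =>
          if PySem.Set.contains p.1 nxt then p else (PySem.Set.add p.1 nxt, p.2 ++ [nxt]))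
        (seen, q)
      pvBfs adj fuel st.2 st.1 (size + 1)

def induced_components (rows : List (List (String × String))) (node_subset : List String) : Int × Int :=
  if node_subset.isEmpty then (0, 0)
  else
    let adj := pvAdj rows node_subset
    let res := (PySem.List.sorted node_subset (fun x => x) false).foldl
      (fun (st : PySem.Set String × List Int) start =>
        if PySem.Set.contains st.1 start then st
        else
          let bf := pvBfs adj (node_subset.length + 1) [start] (PySem.Set.add st.1 start) 0
          (bf.1, st.2 ++ [bf.2]))
      (PySem.Set.empty, [])
    ((res.2.length : Int), match PySem.List.max? res.2 (fun x => x) with | some m => m | none => 0)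

-- ===== PORT B =====
-- one edge step of the union-by-relabelling; the dict comprehension over label.items()
-- is ported as Dict.mk of the mapped items list (exact: the keys are unchanged and distinct)
def pvLabelStep (d : PySem.Dict String String) (r : List (String × String)) :
    PySem.Dict String String :=
  let a := pvGetS r "source"
  if d.contains a then
    let b := pvGetS r "target"
    if d.contains b then
      let la := d.getD a ""
      let lb := d.getD b ""
      if la = lb then d
      else PySem.Dict.mk (d.items.map (fun p => (p.1, if p.2 == lb then la else p.2)))
    else d
  else d

-- label = {n: n for n in node_subset}; then the edge loop
def pvLabel (rows : List (List (String × String))) (S : List String) : PySem.Dict String String :=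
  rows.foldl pvLabelStep (S.foldl (fun d n => d.insert n n) PySem.Dict.empty)

def induced_components_alt (rows : List (List (String × String))) (node_subset : List String) : Int × Int :=
  let label := pvLabel rows node_subset
  let counts : PySem.Dict String Int :=
    node_subset.foldl (fun c n => c.modify (label.getD n "") 0 (· + 1)) PySem.Dict.empty
  if counts.items.isEmpty then (0, 0)
  else ((counts.size : Int), match PySem.List.max? counts.values (fun x => x) with | some m => m | none => 0)

-- ===== PRECONDITION & SPEC =====
-- Pre_ excludes (a) inputs on which Python A raises KeyError ("source" missing, or "target"
-- missing while the source is in the subset), and (b) node_subset lists with duplicate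
-- entries, which do not denote any Python set value (the Python argument is a set, so the
-- tester's inputs always satisfy this clause).
def Pre_induced_components (rows : List (List (String × String))) (node_subset : List String) : Prop :=
  node_subset.Nodup ∧
  ∀ r ∈ rows, ((PySem.Dict.mk r).get? "source").isSome = true ∧
    (pvGetS r "source" ∈ node_subset → ((PySem.Dict.mk r).get? "target").isSome = true)
instance (rows : List (List (String × String))) (node_subset : List String) : Decidable (Pre_induced_components rows node_subset) := by unfold Pre_induced_components; infer_instance

def pvWitness_induced_components : (List (List (String × String))) × List String :=
  ([[("source", "a"), ("target", "b")], [("source", "c"), ("target", "a")]], ["a", "b", "c", "d"])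

def Spec_induced_components (rows : List (List (String × String))) (node_subset : List String) (out : Int × Int) : Prop := out = induced_components_alt rows node_subset
instance (rows : List (List (String × String))) (node_subset : List String) (out : Int × Int) : Decidable (Spec_induced_components rows node_subset out) := by unfold Spec_induced_components; infer_instance

-- ===== CLAIM (what is proved, stated in full; the proofs are below) =====
def Claim_equal_induced_components : Prop := ∀ (rows : List (List (String × String))) (node_subset : List String), Dom_induced_components rows node_subset → Pre_induced_components rows node_subset → Spec_induced_components rows node_subset (induced_components rows node_subset)

-- ===== LEMMAS AND PROOFS =====

-- the induced symmetric edge relation on the subset, and its connectivity closure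
def pvRel (rows : List (List (String × String))) (S : List String) (x y : String) : Prop :=
  ∃ r ∈ rows, (pvGetS r "source" ∈ S ∧ pvGetS r "target" ∈ S) ∧
    ((pvGetS r "source" = x ∧ pvGetS r "target" = y) ∨ (pvGetS r "source" = y ∧ pvGetS r "target" = x))

def pvConn (rows : List (List (String × String))) (S : List String) (x y : String) : Prop :=
  Relation.ReflTransGen (pvRel rows S) x y

-- B's final label function
def pvL (rows : List (List (String × String))) (S : List String) (x : String) : String :=
  (pvLabel rows S).getD x ""

-- the class size read through the labels, as an Int
def pvCnt (rows : List (List (String × String))) (S : List String) (v : String) : Int :=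
  (((S.map (pvL rows S)).count v : Nat) : Int)

theorem pvRel_symm {rows : List (List (String × String))} {S : List String} {x y : String}
    (h : pvRel rows S x y) : pvRel rows S y x := by
  obtain ⟨r, hr, hg, hc⟩ := h
  exact ⟨r, hr, hg, hc.symm⟩

theorem pvConn_symm {rows : List (List (String × String))} {S : List String} {x y : String}
    (h : pvConn rows S x y) : pvConn rows S y x := by
  induction h with
  | refl => exact Relation.ReflTransGen.refl
  | tail _ hr ih => exact Relation.ReflTransGen.head (pvRel_symm hr) ih

theorem pvRel_mem {rows : List (List (String × String))} {S : List String} {x y : String}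
    (h : pvRel rows S x y) : x ∈ S ∧ y ∈ S := by
  obtain ⟨r, hr, ⟨hs, ht⟩, hc⟩ := h
  rcases hc with ⟨ha, hb⟩ | ⟨ha, hb⟩ <;> subst ha <;> subst hb <;> exact ⟨by assumption, by assumption⟩

theorem pvConn_mem {rows : List (List (String × String))} {S : List String} {x y : String}
    (hx : x ∈ S) (h : pvConn rows S x y) : y ∈ S := by
  induction h with
  | refl => exact hx
  | tail _ hr _ => exact (pvRel_mem hr).2

theorem pvConn_nil {S : List String} {x y : String} : pvConn [] S x y ↔ x = y := by
  constructor
  · intro h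
    induction h with
    | refl => rfl
    | tail _ hr _ => obtain ⟨r, hr', _⟩ := hr; simp at hr'
  · rintro rfl; exact Relation.ReflTransGen.refl

theorem pvRel_append {rows : List (List (String × String))} {r : List (String × String)}
    {S : List String} {x y : String} :
    pvRel (rows ++ [r]) S x y ↔ pvRel rows S x y ∨
      ((pvGetS r "source" ∈ S ∧ pvGetS r "target" ∈ S) ∧
        ((pvGetS r "source" = x ∧ pvGetS r "target" = y) ∨
         (pvGetS r "source" = y ∧ pvGetS r "target" = x))) := by
  simp only [pvRel, List.mem_append, List.mem_singleton]
  constructor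
  · rintro ⟨r', hr' | rfl, hg, hc⟩
    · exact Or.inl ⟨r', hr', hg, hc⟩
    · exact Or.inr ⟨hg, hc⟩
  · rintro (⟨r', hr', hg, hc⟩ | ⟨hg, hc⟩)
    · exact ⟨r', Or.inl hr', hg, hc⟩
    · exact ⟨r, Or.inr rfl, hg, hc⟩

theorem pvConn_mono {rows : List (List (String × String))} {r : List (String × String)}
    {S : List String} {x y : String} (h : pvConn rows S x y) : pvConn (rows ++ [r]) S x y := by
  induction h with
  | refl => exact Relation.ReflTransGen.refl
  | tail _ hr ih => exact Relation.ReflTransGen.tail ih (pvRel_append.mpr (Or.inl hr))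

theorem pvConn_append {rows : List (List (String × String))} {r : List (String × String)}
    {S : List String} {x y : String} :
    pvConn (rows ++ [r]) S x y ↔ pvConn rows S x y ∨
      ((pvGetS r "source" ∈ S ∧ pvGetS r "target" ∈ S) ∧
        ((pvConn rows S x (pvGetS r "source") ∧ pvConn rows S (pvGetS r "target") y) ∨
         (pvConn rows S x (pvGetS r "target") ∧ pvConn rows S (pvGetS r "source") y))) := by
  constructor
  · intro h
    induction h with
    | refl => exact Or.inl Relation.ReflTransGen.refl
    | tail _ hr ih =>
      rcases pvRel_append.mp hr with hold | ⟨hg, hc⟩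
      · rcases ih with h1 | ⟨hg, h2⟩
        · exact Or.inl (h1.tail hold)
        · refine Or.inr ⟨hg, ?_⟩
          rcases h2 with ⟨hxa, hby⟩ | ⟨hxb, hay⟩
          · exact Or.inl ⟨hxa, hby.tail hold⟩
          · exact Or.inr ⟨hxb, hay.tail hold⟩
      · rcases ih with h1 | ⟨hg2, h2⟩
        · rcases hc with ⟨hsb, htc⟩ | ⟨hsc, htb⟩
          · exact Or.inr ⟨hg, Or.inl ⟨hsb ▸ h1, htc ▸ Relation.ReflTransGen.refl⟩⟩
          · exact Or.inr ⟨hg, Or.inr ⟨htb ▸ h1, hsc ▸ Relation.ReflTransGen.refl⟩⟩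
        · rcases h2 with ⟨hxs, htb⟩ | ⟨hxt, hsb⟩
          · rcases hc with ⟨hsb', htc⟩ | ⟨hsc, htb'⟩
            · exact Or.inr ⟨hg, Or.inl ⟨hxs, htc ▸ Relation.ReflTransGen.refl⟩⟩
            · exact Or.inl (hsc ▸ hxs)
          · rcases hc with ⟨hsb', htc⟩ | ⟨hsc, htb'⟩
            · exact Or.inl (htc ▸ hxt)
            · exact Or.inr ⟨hg, Or.inr ⟨hxt, hsc ▸ Relation.ReflTransGen.refl⟩⟩
  · have hedge : (pvGetS r "source" ∈ S ∧ pvGetS r "target" ∈ S) →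
        pvConn (rows ++ [r]) S (pvGetS r "source") (pvGetS r "target") := by
      intro hg
      exact Relation.ReflTransGen.single ⟨r, by simp, hg, Or.inl ⟨rfl, rfl⟩⟩
    rintro (h | ⟨hg, ⟨h1, h2⟩ | ⟨h1, h2⟩⟩)
    · exact pvConn_mono h
    · exact ((pvConn_mono h1).trans ((hedge hg).trans (pvConn_mono h2)))
    · exact ((pvConn_mono h1).trans ((pvConn_symm (hedge hg)).trans (pvConn_mono h2)))

-- ===== label-dict lemmas =====

def pvGoodLabel (rows : List (List (String × String))) (S : List String)
    (d : PySem.Dict String String) : Prop :=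
  d.keys = S ∧
  ∀ x ∈ S, ∀ y ∈ S, ((d.getD x "" = d.getD y "") ↔ pvConn rows S x y)

theorem pvKeys_mapVal (d : PySem.Dict String String) (f : String → String) :
    (PySem.Dict.mk (d.items.map (fun p => (p.1, f p.2)))).keys = d.keys := by
  simp only [PySem.Dict.keys, List.map_map]; rfl

theorem pvMem_keys_exists (d : PySem.Dict String String) {x : String} (hx : x ∈ d.keys) :
    ∃ v, (x, v) ∈ d.items ∧ d.getD x "" = v := by
  cases h : d.get? x with
  | none => exact absurd hx ((PySem.Dict.get?_eq_none_iff_not_mem_keys d x).mp h)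
  | some v => exact ⟨v, PySem.Dict.mem_items_of_get?_eq_some d h, PySem.Dict.getD_of_get?_eq_some d _ h⟩

theorem pvGetD_mapVal (d : PySem.Dict String String) (f : String → String)
    (hnd : d.keys.Nodup) {x : String} (hx : x ∈ d.keys) :
    (PySem.Dict.mk (d.items.map (fun p => (p.1, f p.2)))).getD x "" = f (d.getD x "") := by
  obtain ⟨v, hv, hgd⟩ := pvMem_keys_exists d hx
  rw [hgd]
  have hm : (x, f v) ∈ (PySem.Dict.mk (d.items.map (fun p => (p.1, f p.2)))).items :=
    List.mem_map.mpr ⟨(x, v), hv, rfl⟩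
  exact PySem.Dict.getD_of_mem_items _ hm (by rw [pvKeys_mapVal]; exact hnd) _

theorem pvLabelStep_good {rows : List (List (String × String))} {S : List String}
    {r : List (String × String)} {d : PySem.Dict String String} (hS : S.Nodup)
    (hd : pvGoodLabel rows S d) : pvGoodLabel (rows ++ [r]) S (pvLabelStep d r) := by
  obtain ⟨hk, hE⟩ := hd
  have hnd : d.keys.Nodup := by rw [hk]; exact hS
  have hmemkeys : ∀ z, d.contains z = true ↔ z ∈ S := by
    intro z; rw [PySem.Dict.contains_iff_mem_keys, hk]
  have hnoedge : (pvGetS r "source" ∈ S ∧ pvGetS r "target" ∈ S → False) →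
      pvGoodLabel (rows ++ [r]) S d := by
    intro hng
    refine ⟨hk, fun x hx y hy => ?_⟩
    rw [hE x hx y hy, pvConn_append]
    constructor
    · exact Or.inl
    · rintro (h | ⟨hg, _⟩)
      · exact h
      · exact absurd hg hng
  unfold pvLabelStep
  by_cases hca : d.contains (pvGetS r "source") = true
  · by_cases hcb : d.contains (pvGetS r "target") = true
    · have haS : pvGetS r "source" ∈ S := (hmemkeys _).mp hca
      have hbS : pvGetS r "target" ∈ S := (hmemkeys _).mp hcb
      simp only [hca, hcb, if_true]
      by_cases heq : d.getD (pvGetS r "source") "" = d.getD (pvGetS r "target") ""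
      · have hab : pvConn rows S (pvGetS r "source") (pvGetS r "target") :=
          (hE _ haS _ hbS).mp heq
        rw [if_pos heq]
        refine ⟨hk, fun x hx y hy => ?_⟩
        rw [hE x hx y hy, pvConn_append]
        constructor
        · exact Or.inl
        · rintro (h | ⟨_, ⟨h1, h2⟩ | ⟨h1, h2⟩⟩)
          · exact h
          · exact (h1.trans hab).trans h2
          · exact (h1.trans (pvConn_symm hab)).trans h2
      · rw [if_neg heq]
        refine ⟨by rw [pvKeys_mapVal d (fun v => if v == d.getD (pvGetS r "target") "" then d.getD (pvGetS r "source") "" else v)]; exact hk, fun x hx y hy => ?_⟩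
        have hxk : x ∈ d.keys := by rw [hk]; exact hx
        have hyk : y ∈ d.keys := by rw [hk]; exact hy
        rw [pvGetD_mapVal d (fun v => if v == d.getD (pvGetS r "target") "" then d.getD (pvGetS r "source") "" else v) hnd hxk, pvGetD_mapVal d (fun v => if v == d.getD (pvGetS r "target") "" then d.getD (pvGetS r "source") "" else v) hnd hyk, pvConn_append]
        have hxa := hE x hx _ haS
        have hxb := hE x hx _ hbS
        have hya := hE y hy _ haS
        have hyb := hE y hy _ hbS
        have hxy := hE x hx y hy
        by_cases h1 : d.getD x "" = d.getD (pvGetS r "target") "" <;>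
          by_cases h2 : d.getD y "" = d.getD (pvGetS r "target") ""
        · rw [if_pos (by simpa using h1), if_pos (by simpa using h2)]
          simp only [true_iff]
          exact Or.inl (hxy.mp (h1.trans h2.symm))
        · rw [if_pos (by simpa using h1), if_neg (by simpa using h2)]
          constructor
          · intro hder
            exact Or.inr ⟨⟨haS, hbS⟩, Or.inr ⟨hxb.mp h1, pvConn_symm (hya.mp hder.symm)⟩⟩
          · rintro (h | ⟨_, ⟨ha1, ha2⟩ | ⟨ha1, ha2⟩⟩)
            · exact absurd (h1.symm.trans (hxy.mpr h)) (fun hh => h2 hh.symm)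
            · exact absurd ((hxa.mpr ha1).symm.trans h1) (fun hh => heq hh)
            · exact (hya.mpr (pvConn_symm ha2)).symm
        · rw [if_neg (by simpa using h1), if_pos (by simpa using h2)]
          constructor
          · intro hder
            exact Or.inr ⟨⟨haS, hbS⟩, Or.inl ⟨hxa.mp hder, pvConn_symm (hyb.mp h2)⟩⟩
          · rintro (h | ⟨_, ⟨ha1, ha2⟩ | ⟨ha1, ha2⟩⟩)
            · exact absurd ((hxy.mpr h).trans h2) h1
            · exact hxa.mpr ha1
            · exact absurd ((hya.mpr (pvConn_symm ha2)).symm.trans h2) (fun hh => heq hh)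
        · rw [if_neg (by simpa using h1), if_neg (by simpa using h2)]
          rw [hxy]
          constructor
          · exact Or.inl
          · rintro (h | ⟨_, ⟨ha1, ha2⟩ | ⟨ha1, ha2⟩⟩)
            · exact h
            · exact absurd (hyb.mpr (pvConn_symm ha2)) h2
            · exact absurd (hxb.mpr ha1) h1
    · rw [if_pos hca, if_neg hcb]
      exact hnoedge (fun hg => hcb ((hmemkeys _).mpr hg.2))
  · rw [if_neg hca]
    exact hnoedge (fun hg => hca ((hmemkeys _).mpr hg.1))

theorem pvLabel0_items {S : List String} (hS : S.Nodup) :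
    (S.foldl (fun d n => d.insert n n) PySem.Dict.empty).items = S.map (fun n => (n, n)) := by
  have := PySem.Dict.items_foldl_insert_fresh S (fun n => n) (fun n => n) PySem.Dict.empty
    (by intro a _; exact PySem.Dict.contains_empty a) (by simpa using hS)
  simpa using this

theorem pvLabel0_keys {S : List String} (hS : S.Nodup) :
    (S.foldl (fun d n => d.insert n n) PySem.Dict.empty).keys = S := by
  show (S.foldl (fun d n => d.insert n n) PySem.Dict.empty).items.map Prod.fst = S
  rw [pvLabel0_items hS, List.map_map]
  exact List.map_id' S

theorem pvLabel0_getD {S : List String} (hS : S.Nodup) {x : String} (hx : x ∈ S) :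
    (S.foldl (fun d n => d.insert n n) PySem.Dict.empty).getD x "" = x := by
  refine PySem.Dict.getD_of_mem_items _ ?_ (by rw [pvLabel0_keys hS]; exact hS) _
  rw [pvLabel0_items hS]
  exact List.mem_map.mpr ⟨x, hx, rfl⟩

theorem pvLabel_good {rows : List (List (String × String))} {S : List String} (hS : S.Nodup) :
    pvGoodLabel rows S (pvLabel rows S) := by
  induction rows using List.reverseRecOn with
  | nil =>
    refine ⟨pvLabel0_keys hS, fun x hx y hy => ?_⟩
    unfold pvLabel
    simp only [List.foldl_nil]
    rw [pvLabel0_getD hS hx, pvLabel0_getD hS hy]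
    exact pvConn_nil.symm
  | append_singleton rs r ih =>
    have : pvLabel (rs ++ [r]) S = pvLabelStep (pvLabel rs S) r := by
      unfold pvLabel; rw [List.foldl_append]; rfl
    rw [this]
    exact pvLabelStep_good hS ih

-- ===== adjacency lemmas =====

theorem pvAdj0_getD (S : List String) (x : String) :
    ((S.foldl (fun d n => d.insert n (PySem.Set.empty : PySem.Set String)) PySem.Dict.empty).getD x PySem.Set.empty)
      = PySem.Set.empty := by
  suffices h : ∀ (d : PySem.Dict String (PySem.Set String)), d.getD x PySem.Set.empty = PySem.Set.empty →
      (S.foldl (fun d n => d.insert n (PySem.Set.empty : PySem.Set String)) d).getD x PySem.Set.empty = PySem.Set.empty by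
    exact h _ (PySem.Dict.getD_empty x _)
  induction S with
  | nil => intro d hd; simpa using hd
  | cons n t ih =>
    intro d hd
    simp only [List.foldl_cons]
    refine ih _ ?_
    rw [PySem.Dict.getD_insert]
    split_ifs <;> [rfl; exact hd]

theorem pvAdjStep_mem (d : PySem.Dict String (PySem.Set String)) (r : List (String × String))
    (x y : String) :
    (y ∈ (pvAdjStep d r).getD x PySem.Set.empty) ↔ y ∈ d.getD x PySem.Set.empty ∨
      (pvGetS r "source" = x ∧ pvGetS r "target" = y) ∨
      (pvGetS r "target" = x ∧ pvGetS r "source" = y) := by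
  unfold pvAdjStep
  simp only [PySem.Dict.getD_insert]
  split_ifs <;> simp_all [PySem.Set.mem_add] <;> tauto

theorem pvAdjOf_mem {S : List String} :
    ∀ (es : List (List (String × String))),
      (∀ r ∈ es, pvGetS r "source" ∈ S ∧ pvGetS r "target" ∈ S) →
      ∀ x y, (y ∈ (es.foldl pvAdjStep
          (S.foldl (fun d n => d.insert n PySem.Set.empty) PySem.Dict.empty)).getD x PySem.Set.empty)
        ↔ pvRel es S x y := by
  intro es
  induction es using List.reverseRecOn with
  | nil =>
    intro _ x y
    rw [List.foldl_nil, pvAdj0_getD]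
    simp [pvRel]
  | append_singleton es r ih =>
    intro h x y
    have hr := h r (by simp)
    have hes : ∀ r' ∈ es, pvGetS r' "source" ∈ S ∧ pvGetS r' "target" ∈ S := by
      intro r' hr'; exact h r' (by simp [hr'])
    rw [List.foldl_append, List.foldl_cons, List.foldl_nil, pvAdjStep_mem, ih hes, pvRel_append]
    constructor
    · rintro (h1 | ⟨h1, h2⟩ | ⟨h1, h2⟩)
      · exact Or.inl h1
      · exact Or.inr ⟨hr, Or.inl ⟨h1, h2⟩⟩
      · exact Or.inr ⟨hr, Or.inr ⟨h2, h1⟩⟩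
    · rintro (h1 | ⟨_, ⟨h1, h2⟩ | ⟨h1, h2⟩⟩)
      · exact Or.inl h1
      · exact Or.inr (Or.inl ⟨h1, h2⟩)
      · exact Or.inr (Or.inr ⟨h2, h1⟩)

theorem pvAdj_mem {rows : List (List (String × String))} {S : List String} {x y : String} :
    (y ∈ (pvAdj rows S).getD x PySem.Set.empty) ↔ pvRel rows S x y := by
  unfold pvAdj
  rw [pvAdjOf_mem (pvSubEdges rows S) (by
    intro r hr
    unfold pvSubEdges at hr
    rw [List.mem_filter] at hr
    have := hr.2
    simp only [Bool.and_eq_true] at this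
    constructor <;> [exact List.contains_iff_mem.mp this.1; exact List.contains_iff_mem.mp this.2])]
  unfold pvRel pvSubEdges
  constructor
  · rintro ⟨r, hr, hg, hc⟩
    exact ⟨r, (List.mem_filter.mp hr).1, hg, hc⟩
  · rintro ⟨r, hr, hg, hc⟩
    refine ⟨r, List.mem_filter.mpr ⟨hr, ?_⟩, hg, hc⟩
    simp only [Bool.and_eq_true]
    exact ⟨List.contains_iff_mem.mpr hg.1, List.contains_iff_mem.mpr hg.2⟩

-- ===== BFS lemmas =====

theorem pvNodup_length_le {l L : List String} (hl : l.Nodup) (hsub : ∀ x ∈ l, x ∈ L) :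
    l.length ≤ L.length := by
  calc l.length = l.toFinset.card := (List.toFinset_card_of_nodup hl).symm
  _ ≤ L.toFinset.card := Finset.card_le_card (by intro x hx; simp at hx ⊢; exact hsub x hx)
  _ ≤ L.length := L.toFinset_card_le

theorem pvBfs_cons (adj : PySem.Dict String (PySem.Set String)) (fuel : Nat) (cur : String)
    (q : List String) (seen : PySem.Set String) (size : Int) :
    pvBfs adj (fuel + 1) (cur :: q) seen size =
      pvBfs adj fuel
        ((adj.getD cur PySem.Set.empty).foldl
          (fun (p : PySem.Set String × List String) nxt =>
            if PySem.Set.contains p.1 nxt then p else (PySem.Set.add p.1 nxt, p.2 ++ [nxt]))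
          (seen, q)).2
        ((adj.getD cur PySem.Set.empty).foldl
          (fun (p : PySem.Set String × List String) nxt =>
            if PySem.Set.contains p.1 nxt then p else (PySem.Set.add p.1 nxt, p.2 ++ [nxt]))
          (seen, q)).1
        (size + 1) := rfl

theorem pvNbrFold (nbrs : List String) :
    ∀ (seen : PySem.Set String) (q : List String), seen.Nodup → q.Nodup → (∀ x ∈ q, x ∈ seen) →
      (∀ x, x ∈ (nbrs.foldl
          (fun (p : PySem.Set String × List String) nxt =>
            if PySem.Set.contains p.1 nxt then p else (PySem.Set.add p.1 nxt, p.2 ++ [nxt]))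
          (seen, q)).1 ↔ x ∈ seen ∨ x ∈ nbrs) ∧
      (∀ x, x ∈ (nbrs.foldl
          (fun (p : PySem.Set String × List String) nxt =>
            if PySem.Set.contains p.1 nxt then p else (PySem.Set.add p.1 nxt, p.2 ++ [nxt]))
          (seen, q)).2 ↔ x ∈ q ∨ (x ∈ nbrs ∧ x ∉ seen)) ∧
      ((nbrs.foldl
          (fun (p : PySem.Set String × List String) nxt =>
            if PySem.Set.contains p.1 nxt then p else (PySem.Set.add p.1 nxt, p.2 ++ [nxt]))
          (seen, q)).2.length + seen.length = q.length + (nbrs.foldl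
          (fun (p : PySem.Set String × List String) nxt =>
            if PySem.Set.contains p.1 nxt then p else (PySem.Set.add p.1 nxt, p.2 ++ [nxt]))
          (seen, q)).1.length) ∧
      ((nbrs.foldl
          (fun (p : PySem.Set String × List String) nxt =>
            if PySem.Set.contains p.1 nxt then p else (PySem.Set.add p.1 nxt, p.2 ++ [nxt]))
          (seen, q)).1.Nodup) ∧
      ((nbrs.foldl
          (fun (p : PySem.Set String × List String) nxt =>
            if PySem.Set.contains p.1 nxt then p else (PySem.Set.add p.1 nxt, p.2 ++ [nxt]))
          (seen, q)).2.Nodup) ∧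
      (∀ x ∈ (nbrs.foldl
          (fun (p : PySem.Set String × List String) nxt =>
            if PySem.Set.contains p.1 nxt then p else (PySem.Set.add p.1 nxt, p.2 ++ [nxt]))
          (seen, q)).2, x ∈ (nbrs.foldl
          (fun (p : PySem.Set String × List String) nxt =>
            if PySem.Set.contains p.1 nxt then p else (PySem.Set.add p.1 nxt, p.2 ++ [nxt]))
          (seen, q)).1) := by
  induction nbrs with
  | nil =>
    intro seen q hsn hqn hqs
    simp only [List.foldl_nil]
    exact ⟨fun x => by simp, fun x => by simp, trivial, hsn, hqn, hqs⟩
  | cons n t ih =>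
    intro seen q hsn hqn hqs
    simp only [List.foldl_cons]
    by_cases hc : PySem.Set.contains seen n = true
    · have hns : n ∈ seen := (PySem.Set.contains_iff _ _).mp hc
      rw [if_pos hc]
      obtain ⟨f1, f2, f3, f4, f5, f6⟩ := ih seen q hsn hqn hqs
      refine ⟨fun x => ?_, fun x => ?_, f3, f4, f5, f6⟩
      · rw [f1]
        constructor
        · rintro (h | h)
          · exact Or.inl h
          · exact Or.inr (List.mem_cons_of_mem _ h)
        · rintro (h | h)
          · exact Or.inl h
          · rcases List.mem_cons.mp h with rfl | h
            · exact Or.inl hns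
            · exact Or.inr h
      · rw [f2]
        constructor
        · rintro (h | ⟨h1, h2⟩)
          · exact Or.inl h
          · exact Or.inr ⟨List.mem_cons_of_mem _ h1, h2⟩
        · rintro (h | ⟨h1, h2⟩)
          · exact Or.inl h
          · rcases List.mem_cons.mp h1 with rfl | h1
            · exact absurd hns h2
            · exact Or.inr ⟨h1, h2⟩
    · have hns : n ∉ seen := fun h => hc ((PySem.Set.contains_iff _ _).mpr h)
      rw [if_neg hc]
      have hadd : PySem.Set.add seen n = seen ++ [n] := PySem.Set.add_of_not_mem hns
      have hsn' : (PySem.Set.add seen n).Nodup := PySem.Set.nodup_add seen n hsn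
      have hqn' : (q ++ [n]).Nodup := by
        refine List.Nodup.append hqn (List.nodup_singleton n) ?_
        intro a ha hb
        simp only [List.mem_singleton] at hb
        subst hb
        exact hns (hqs _ ha)
      have hqs' : ∀ x ∈ q ++ [n], x ∈ PySem.Set.add seen n := by
        intro x hx
        rcases List.mem_append.mp hx with hx | hx
        · rw [PySem.Set.mem_add]
          exact Or.inl (hqs _ hx)
        · simp only [List.mem_singleton] at hx; subst hx
          rw [PySem.Set.mem_add]
          exact Or.inr rfl
      obtain ⟨f1, f2, f3, f4, f5, f6⟩ := ih (PySem.Set.add seen n) (q ++ [n]) hsn' hqn' hqs'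
      refine ⟨fun x => ?_, fun x => ?_, ?_, f4, f5, f6⟩
      · rw [f1, PySem.Set.mem_add]
        constructor
        · rintro ((h | h) | h)
          · exact Or.inl h
          · exact Or.inr (by simp [h])
          · exact Or.inr (List.mem_cons_of_mem _ h)
        · rintro (h | h)
          · exact Or.inl (Or.inl h)
          · rcases List.mem_cons.mp h with rfl | h
            · exact Or.inl (Or.inr rfl)
            · exact Or.inr h
      · rw [f2, PySem.Set.mem_add, List.mem_append]
        constructor
        · rintro ((h | h) | ⟨h1, h2⟩)
          · exact Or.inl h
          · simp only [List.mem_singleton] at h; subst h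
            exact Or.inr ⟨List.mem_cons_self, hns⟩
          · push_neg at h2
            exact Or.inr ⟨List.mem_cons_of_mem _ h1, h2.1⟩
        · rintro (h | ⟨h1, h2⟩)
          · exact Or.inl (Or.inl h)
          · rcases List.mem_cons.mp h1 with rfl | h1
            · exact Or.inl (Or.inr (by simp))
            · by_cases hxn : x = n
              · subst hxn; exact Or.inl (Or.inr (by simp))
              · exact Or.inr ⟨h1, fun hh => hh.elim h2 hxn⟩
      · have hl1 : (PySem.Set.add seen n).length = seen.length + 1 := by
          rw [hadd, List.length_append, List.length_singleton]
        have hl2 : (q ++ [n]).length = q.length + 1 := by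
          rw [List.length_append, List.length_singleton]
        omega

theorem pvBfs_nilfuel (adj : PySem.Dict String (PySem.Set String)) (fuel : Nat)
    (seen : PySem.Set String) (size : Int) : pvBfs adj fuel [] seen size = (seen, size) := by
  cases fuel <;> rfl

theorem pvBfs_main {rows : List (List (String × String))} {S : List String} (hS : S.Nodup) :
    ∀ (fuel : Nat) (q : List String) (seen : PySem.Set String) (size : Int),
      seen.Nodup → (∀ x ∈ seen, x ∈ S) → q.Nodup → (∀ x ∈ q, x ∈ seen) →
      (∀ x ∈ seen, x ∉ q → ∀ y, pvRel rows S x y → y ∈ seen) →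
      q.length + (S.length - seen.length) ≤ fuel →
      (∀ x ∈ seen, x ∈ (pvBfs (pvAdj rows S) fuel q seen size).1) ∧
      (∀ x ∈ (pvBfs (pvAdj rows S) fuel q seen size).1,
          x ∈ seen ∨ ∃ z ∈ q, pvConn rows S z x) ∧
      ((pvBfs (pvAdj rows S) fuel q seen size).1.Nodup ∧
        ∀ x ∈ (pvBfs (pvAdj rows S) fuel q seen size).1, x ∈ S) ∧
      (∀ x ∈ (pvBfs (pvAdj rows S) fuel q seen size).1, ∀ y, pvRel rows S x y →
          y ∈ (pvBfs (pvAdj rows S) fuel q seen size).1) ∧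
      ((pvBfs (pvAdj rows S) fuel q seen size).2 =
        size + (q.length : Int) + ((pvBfs (pvAdj rows S) fuel q seen size).1.length : Int)
          - (seen.length : Int)) := by
  intro fuel
  induction fuel with
  | zero =>
    intro q seen size h1 h2 h3 h4 h5 hfuel
    have hq : q = [] := List.length_eq_zero_iff.mp (by omega)
    subst hq
    show (∀ x ∈ seen, x ∈ seen) ∧ _ ∧ _ ∧ _ ∧ _
    refine ⟨fun x hx => hx, fun x hx => Or.inl hx, ⟨h1, h2⟩,
      fun x hx y hy => h5 x hx (by simp) y hy, by
        rw [pvBfs_nilfuel]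
        show size = size + ((0:Nat):Int) + ((seen.length:Nat):Int) - (seen.length:Int)
        push_cast; ring⟩
  | succ fuel ih =>
    intro q seen size h1 h2 h3 h4 h5 hfuel
    match q with
    | [] =>
      show (∀ x ∈ seen, x ∈ seen) ∧ _ ∧ _ ∧ _ ∧ _
      refine ⟨fun x hx => hx, fun x hx => Or.inl hx, ⟨h1, h2⟩,
        fun x hx y hy => h5 x hx (by simp) y hy, by
        rw [pvBfs_nilfuel]
        show size = size + ((0:Nat):Int) + ((seen.length:Nat):Int) - (seen.length:Int)
        push_cast; ring⟩
    | cur :: qrest =>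
      rw [pvBfs_cons]
      have hcur : cur ∈ seen := h4 cur List.mem_cons_self
      obtain ⟨f1, f2, f3, f4, f5, f6⟩ :=
        pvNbrFold ((pvAdj rows S).getD cur PySem.Set.empty) seen qrest h1
          (List.Nodup.of_cons h3) (fun x hx => h4 x (List.mem_cons_of_mem _ hx))
      set st := (((pvAdj rows S).getD cur PySem.Set.empty).foldl
          (fun (p : PySem.Set String × List String) nxt =>
            if PySem.Set.contains p.1 nxt then p else (PySem.Set.add p.1 nxt, p.2 ++ [nxt]))
          (seen, qrest)) with hst
      have hnbr : ∀ y, (y ∈ (pvAdj rows S).getD cur PySem.Set.empty) ↔ pvRel rows S cur y :=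
        fun y => pvAdj_mem
      have h2' : ∀ x ∈ st.1, x ∈ S := by
        intro x hx
        rcases (f1 x).mp hx with h | h
        · exact h2 x h
        · exact (pvRel_mem ((hnbr x).mp h)).2
      have h5' : ∀ x ∈ st.1, x ∉ st.2 → ∀ y, pvRel rows S x y → y ∈ st.1 := by
        intro x hx hnx y hy
        by_cases hxs : x ∈ seen
        · by_cases hxc : x = cur
          · subst hxc
            exact (f1 y).mpr (Or.inr ((hnbr y).mpr hy))
          · have hxq : x ∉ qrest := fun hq => hnx ((f2 x).mpr (Or.inl hq))
            have : y ∈ seen := h5 x hxs (by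
              intro hmem
              rcases List.mem_cons.mp hmem with h | h
              · exact hxc h
              · exact hxq h) y hy
            exact (f1 y).mpr (Or.inl ((f1 x).mp hx |> fun _ => this)) -- y ∈ seen → st.1
        · rcases (f1 x).mp hx with h | h
          · exact absurd h hxs
          · exact absurd ((f2 x).mpr (Or.inr ⟨h, hxs⟩)) hnx
      have hlen1 : st.1.length ≤ S.length := pvNodup_length_le f4 h2'
      have hlen2 : seen.length ≤ st.1.length :=
        pvNodup_length_le h1 (fun x hx => (f1 x).mpr (Or.inl hx))
      have hfuel' : st.2.length + (S.length - st.1.length) ≤ fuel := by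
        have := f3
        simp only [List.length_cons] at hfuel
        omega
      obtain ⟨c1, c2, c3, c4, c5⟩ := ih st.2 st.1 (size + 1) f4 h2' f5 f6 h5' hfuel'
      refine ⟨?_, ?_, c3, c4, ?_⟩
      · intro x hx
        exact c1 x ((f1 x).mpr (Or.inl hx))
      · intro x hx
        rcases c2 x hx with h | ⟨z, hz, hconn⟩
        · rcases (f1 x).mp h with h | h
          · exact Or.inl h
          · exact Or.inr ⟨cur, List.mem_cons_self,
              Relation.ReflTransGen.single ((hnbr x).mp h)⟩
        · rcases (f2 z).mp hz with h | ⟨h, _⟩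
          · exact Or.inr ⟨z, List.mem_cons_of_mem _ h, hconn⟩
          · exact Or.inr ⟨cur, List.mem_cons_self,
              (Relation.ReflTransGen.single ((hnbr z).mp h)).trans hconn⟩
      · have hf3 : (st.2.length : Int) + (seen.length : Int)
            = (qrest.length : Int) + (st.1.length : Int) := by exact_mod_cast f3
        simp only [List.length_cons] at c5 ⊢
        push_cast at c5 ⊢
        omega

-- a Conn path starting in a closed set stays in it
theorem pvClosed_conn {rows : List (List (String × String))} {S : List String}
    {T : PySem.Set String} (hc : ∀ x ∈ T, ∀ y, pvRel rows S x y → y ∈ T)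
    {x y : String} (hx : x ∈ T) (h : pvConn rows S x y) : y ∈ T := by
  induction h with
  | refl => exact hx
  | tail _ hr ih => exact hc _ ih _ hr

theorem pvBfs_run {rows : List (List (String × String))} {S : List String} (hS : S.Nodup)
    {seen₀ : PySem.Set String} (h₀n : seen₀.Nodup) (h₀S : ∀ x ∈ seen₀, x ∈ S)
    (h₀c : ∀ x ∈ seen₀, ∀ y, pvRel rows S x y → y ∈ seen₀)
    {start : String} (hstS : start ∈ S) (hst : start ∉ seen₀) :
    (∀ x, x ∈ (pvBfs (pvAdj rows S) (S.length + 1) [start] (PySem.Set.add seen₀ start) 0).1 ↔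
        (x ∈ seen₀ ∨ pvConn rows S start x)) ∧
    ((pvBfs (pvAdj rows S) (S.length + 1) [start] (PySem.Set.add seen₀ start) 0).1.Nodup ∧
      (∀ x ∈ (pvBfs (pvAdj rows S) (S.length + 1) [start] (PySem.Set.add seen₀ start) 0).1, x ∈ S)) ∧
    ((pvBfs (pvAdj rows S) (S.length + 1) [start] (PySem.Set.add seen₀ start) 0).2 =
      ((pvBfs (pvAdj rows S) (S.length + 1) [start] (PySem.Set.add seen₀ start) 0).1.length : Int)
        - (seen₀.length : Int)) := by
  have hsn : (PySem.Set.add seen₀ start).Nodup := PySem.Set.nodup_add seen₀ start h₀n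
  have hadd : ∀ x, x ∈ PySem.Set.add seen₀ start ↔ (x ∈ seen₀ ∨ x = start) :=
    fun x => PySem.Set.mem_add _ _ _
  have hsS : ∀ x ∈ PySem.Set.add seen₀ start, x ∈ S := by
    intro x hx
    rcases (hadd x).mp hx with h | rfl
    · exact h₀S x h
    · exact hstS
  have hclosed : ∀ x ∈ PySem.Set.add seen₀ start, x ∉ [start] →
      ∀ y, pvRel rows S x y → y ∈ PySem.Set.add seen₀ start := by
    intro x hx hnx y hy
    rcases (hadd x).mp hx with h | rfl
    · exact (hadd y).mpr (Or.inl (h₀c x h y hy))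
    · exact absurd (List.mem_singleton.mpr rfl) hnx
  have hlen : (PySem.Set.add seen₀ start).length = seen₀.length + 1 := by
    rw [PySem.Set.add_of_not_mem hst, List.length_append, List.length_singleton]
  have hfuel : ([start] : List String).length +
      (S.length - (PySem.Set.add seen₀ start).length) ≤ S.length + 1 := by
    simp only [List.length_singleton]
    omega
  obtain ⟨c1, c2, c3, c4, c5⟩ := pvBfs_main hS (S.length + 1) [start] (PySem.Set.add seen₀ start) 0
    hsn hsS (List.nodup_singleton start) (fun x hx => by
      simp only [List.mem_singleton] at hx; exact (hadd x).mpr (Or.inr hx))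
    hclosed hfuel
  have hstartin : start ∈ (pvBfs (pvAdj rows S) (S.length + 1) [start] (PySem.Set.add seen₀ start) 0).1 :=
    c1 start ((hadd start).mpr (Or.inr rfl))
  refine ⟨fun x => ⟨fun hx => ?_, fun hx => ?_⟩, ⟨c3.1, c3.2⟩, ?_⟩
  · rcases c2 x hx with h | ⟨z, hz, hconn⟩
    · rcases (hadd x).mp h with h | rfl
      · exact Or.inl h
      · exact Or.inr Relation.ReflTransGen.refl
    · simp only [List.mem_singleton] at hz; subst hz
      exact Or.inr hconn
  · rcases hx with h | hconn
    · exact c1 x ((hadd x).mpr (Or.inl h))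
    · exact pvClosed_conn c4 hstartin hconn
  · rw [c5]
    simp only [List.length_singleton]
    push_cast [hlen]
    ring

-- max over a list is permutation-invariant
theorem pvMax?_perm {xs ys : List Int} (h : xs.Perm ys) :
    PySem.List.max? xs (fun x => x) = PySem.List.max? ys (fun x => x) := by
  rcases hxe : xs with _ | ⟨a, t⟩
  · subst hxe; rw [h.nil_eq.symm]
  · have hne : xs ≠ [] := by subst hxe; simp
    have hyne : ys ≠ [] := by intro hy; subst hy; exact hne h.eq_nil
    rw [← hxe] at *
    obtain ⟨m, hm⟩ : ∃ m, PySem.List.max? xs (fun x => x) = some m := by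
      cases hx : PySem.List.max? xs (fun x => x)
      · exact absurd ((PySem.List.max?_eq_none_iff xs _).mp hx) hne
      · exact ⟨_, rfl⟩
    obtain ⟨m2, hm2⟩ : ∃ m2, PySem.List.max? ys (fun x => x) = some m2 := by
      cases hy : PySem.List.max? ys (fun x => x)
      · exact absurd ((PySem.List.max?_eq_none_iff ys _).mp hy) hyne
      · exact ⟨_, rfl⟩
    rw [hm, hm2]
    have h1 := PySem.List.max?_isMax hm m2 (h.mem_iff.mpr (PySem.List.max?_mem hm2))
    have h2 := PySem.List.max?_isMax hm2 m (h.mem_iff.mp (PySem.List.max?_mem hm))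
    exact congrArg some (le_antisymm h2 h1)

theorem pvFilter_perm {rows : List (List (String × String))} {S : List String} (hS : S.Nodup)
    (hE : ∀ x ∈ S, ∀ y ∈ S, ((pvL rows S x = pvL rows S y) ↔ pvConn rows S x y))
    {seen bf1 : PySem.Set String} (hseenN : seen.Nodup) (hbfN : bf1.Nodup)
    {s : String} (hsS : s ∈ S) (hsn : s ∉ seen)
    (hcl : ∀ x ∈ seen, ∀ y, pvRel rows S x y → y ∈ seen)
    (hmem : ∀ x, x ∈ bf1 ↔ (x ∈ seen ∨ pvConn rows S s x)) :
    (bf1.length : Int) - (seen.length : Int) = pvCnt rows S (pvL rows S s) := by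
  have hdisj : ∀ x, pvConn rows S s x → x ∉ seen := by
    intro x hconn hx
    exact hsn (pvClosed_conn hcl hx (pvConn_symm hconn))
  have hfe : ∀ x, (x ∈ S.filter (fun n => pvL rows S n == pvL rows S s)) ↔ pvConn rows S s x := by
    intro x
    rw [List.mem_filter]
    constructor
    · rintro ⟨hxS, hb⟩
      exact pvConn_symm ((hE x hxS s hsS).mp (by simpa using hb))
    · intro hconn
      have hxS : x ∈ S := pvConn_mem hsS hconn
      exact ⟨hxS, by simpa using (hE x hxS s hsS).mpr (pvConn_symm hconn)⟩
  have hperm : bf1.Perm (seen ++ S.filter (fun n => pvL rows S n == pvL rows S s)) := by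
    rw [List.perm_ext_iff_of_nodup hbfN (by
      refine List.Nodup.append hseenN (List.Nodup.filter _ hS) ?_
      intro a ha hb
      exact absurd ha (hdisj a ((hfe a).mp hb)))]
    intro a
    rw [hmem, List.mem_append, hfe]
  have hlen := hperm.length_eq
  rw [List.length_append] at hlen
  have hcnt : (S.filter (fun n => pvL rows S n == pvL rows S s)).length
      = (S.map (pvL rows S)).count (pvL rows S s) := by
    rw [List.count_eq_countP, List.countP_map, ← List.countP_eq_length_filter]
    rfl
  unfold pvCnt
  omega

theorem pvFlood_spec {rows : List (List (String × String))} {S : List String} (hS : S.Nodup)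
    (hE : ∀ x ∈ S, ∀ y ∈ S, ((pvL rows S x = pvL rows S y) ↔ pvConn rows S x y)) :
    ∀ (L : List String), (∀ s ∈ L, s ∈ S) →
    ∀ (seen : PySem.Set String) (sizes : List Int) (reps : List String),
      seen.Nodup → (∀ x ∈ seen, x ∈ S) →
      (∀ x ∈ seen, ∀ y, pvRel rows S x y → y ∈ seen) →
      (∀ x, x ∈ seen ↔ ∃ rep ∈ reps, pvConn rows S rep x) →
      (∀ rep ∈ reps, rep ∈ S) →
      reps.Pairwise (fun a b => ¬ pvConn rows S a b) →
      sizes = reps.map (fun rep => pvCnt rows S (pvL rows S rep)) →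
      ∃ reps' : List String,
        (∀ x, x ∈ (L.foldl
            (fun (st : PySem.Set String × List Int) start =>
              if PySem.Set.contains st.1 start then st
              else
                let bf := pvBfs (pvAdj rows S) (S.length + 1) [start] (PySem.Set.add st.1 start) 0
                (bf.1, st.2 ++ [bf.2])) (seen, sizes)).1 ↔ ∃ rep ∈ reps', pvConn rows S rep x) ∧
        (∀ rep ∈ reps', rep ∈ S) ∧
        reps'.Pairwise (fun a b => ¬ pvConn rows S a b) ∧
        ((L.foldl
            (fun (st : PySem.Set String × List Int) start =>
              if PySem.Set.contains st.1 start then st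
              else
                let bf := pvBfs (pvAdj rows S) (S.length + 1) [start] (PySem.Set.add st.1 start) 0
                (bf.1, st.2 ++ [bf.2])) (seen, sizes)).2
          = reps'.map (fun rep => pvCnt rows S (pvL rows S rep))) ∧
        (∀ s ∈ L, s ∈ (L.foldl
            (fun (st : PySem.Set String × List Int) start =>
              if PySem.Set.contains st.1 start then st
              else
                let bf := pvBfs (pvAdj rows S) (S.length + 1) [start] (PySem.Set.add st.1 start) 0
                (bf.1, st.2 ++ [bf.2])) (seen, sizes)).1) ∧
        (∀ x ∈ seen, x ∈ (L.foldl
            (fun (st : PySem.Set String × List Int) start =>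
              if PySem.Set.contains st.1 start then st
              else
                let bf := pvBfs (pvAdj rows S) (S.length + 1) [start] (PySem.Set.add st.1 start) 0
                (bf.1, st.2 ++ [bf.2])) (seen, sizes)).1) := by
  intro L
  induction L with
  | nil =>
    intro _ seen sizes reps h1 h2 h3 h4 h5 h6 h7
    exact ⟨reps, h4, h5, h6, by simpa using h7, by simp, fun x hx => hx⟩
  | cons s L ih =>
    intro hL seen sizes reps h1 h2 h3 h4 h5 h6 h7
    have hsS : s ∈ S := hL s List.mem_cons_self
    have hL' : ∀ t ∈ L, t ∈ S := fun t ht => hL t (List.mem_cons_of_mem _ ht)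
    simp only [List.foldl_cons]
    by_cases hc : PySem.Set.contains seen s = true
    · rw [if_pos hc]
      obtain ⟨reps', g1, g2, g3, g4, g5, g6⟩ := ih hL' seen sizes reps h1 h2 h3 h4 h5 h6 h7
      refine ⟨reps', g1, g2, g3, g4, ?_, g6⟩
      intro t ht
      rcases List.mem_cons.mp ht with rfl | ht
      · exact g6 t ((PySem.Set.contains_iff _ _).mp hc)
      · exact g5 t ht
    · rw [if_neg hc]
      have hsn : s ∉ seen := fun h => hc ((PySem.Set.contains_iff _ _).mpr h)
      obtain ⟨r1, ⟨r2n, r2S⟩, r3⟩ := pvBfs_run hS h1 h2 h3 hsS hsn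
      set bf := pvBfs (pvAdj rows S) (S.length + 1) [s] (PySem.Set.add seen s) 0 with hbf
      have hcl' : ∀ x ∈ bf.1, ∀ y, pvRel rows S x y → y ∈ bf.1 := by
        intro x hx y hy
        rcases (r1 x).mp hx with h | h
        · exact (r1 y).mpr (Or.inl (h3 x h y hy))
        · exact (r1 y).mpr (Or.inr (h.tail hy))
      have h4' : ∀ x, x ∈ bf.1 ↔ ∃ rep ∈ reps ++ [s], pvConn rows S rep x := by
        intro x
        rw [r1]
        constructor
        · rintro (h | h)
          · obtain ⟨rep, hrep, hcn⟩ := (h4 x).mp h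
            exact ⟨rep, List.mem_append.mpr (Or.inl hrep), hcn⟩
          · exact ⟨s, by simp, h⟩
        · rintro ⟨rep, hrep, hcn⟩
          rcases List.mem_append.mp hrep with h | h
          · exact Or.inl ((h4 x).mpr ⟨rep, h, hcn⟩)
          · simp only [List.mem_singleton] at h; subst h
            exact Or.inr hcn
      have h5' : ∀ rep ∈ reps ++ [s], rep ∈ S := by
        intro rep hrep
        rcases List.mem_append.mp hrep with h | h
        · exact h5 rep h
        · simp only [List.mem_singleton] at h; subst h; exact hsS
      have h6' : (reps ++ [s]).Pairwise (fun a b => ¬ pvConn rows S a b) := by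
        rw [List.pairwise_append]
        refine ⟨h6, List.pairwise_singleton _ _, ?_⟩
        intro a ha b hb
        simp only [List.mem_singleton] at hb
        intro hcn
        exact hsn ((h4 s).mpr ⟨a, ha, hb ▸ hcn⟩)
      have hsz : bf.2 = pvCnt rows S (pvL rows S s) := by
        rw [r3]
        exact pvFilter_perm hS hE h1 r2n hsS hsn h3 r1
      have h7' : sizes ++ [bf.2] = (reps ++ [s]).map (fun rep => pvCnt rows S (pvL rows S rep)) := by
        rw [List.map_append, ← h7, hsz]
        rfl
      obtain ⟨reps', g1, g2, g3, g4, g5, g6⟩ := ih hL' bf.1 (sizes ++ [bf.2]) (reps ++ [s])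
        r2n r2S hcl' h4' h5' h6' h7'
      refine ⟨reps', g1, g2, g3, g4, ?_, ?_⟩
      · intro t ht
        rcases List.mem_cons.mp ht with rfl | ht
        · exact g6 t ((r1 t).mpr (Or.inr Relation.ReflTransGen.refl))
        · exact g5 t ht
      · intro x hx
        exact g6 x ((r1 x).mpr (Or.inl hx))

theorem pvLabel_nilS (rows : List (List (String × String))) :
    pvLabel rows [] = PySem.Dict.empty := by
  unfold pvLabel
  rw [List.foldl_nil]
  induction rows with
  | nil => rfl
  | cons r t ih =>
    rw [List.foldl_cons]
    have hstep : pvLabelStep PySem.Dict.empty r = PySem.Dict.empty := by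
      simp [pvLabelStep, PySem.Dict.contains_empty]
    rw [hstep, ih]

theorem induced_components_spec : Claim_equal_induced_components := by
  intro rows S _ hpre
  obtain ⟨hS, -⟩ := hpre
  unfold Spec_induced_components
  by_cases hnil : S = []
  · subst hnil
    show induced_components rows [] = induced_components_alt rows []
    unfold induced_components induced_components_alt
    rw [pvLabel_nilS]
    rfl
  · have hie : S.isEmpty = false := by
      cases S with
      | nil => exact absurd rfl hnil
      | cons a t => rfl
    obtain ⟨hk, hEd⟩ := pvLabel_good (rows := rows) hS
    have hE : ∀ x ∈ S, ∀ y ∈ S, ((pvL rows S x = pvL rows S y) ↔ pvConn rows S x y) :=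
      fun x hx y hy => hEd x hx y hy
    obtain ⟨reps', g1, g2, g3, g4, g5, g6⟩ :=
      pvFlood_spec hS hE (PySem.List.sorted S (fun x => x) false)
        (fun s hs => (PySem.List.mem_sorted S _ false s).mp hs)
        PySem.Set.empty [] []
        List.Pairwise.nil
        (fun x hx => absurd hx (List.not_mem_nil))
        (fun x hx => absurd hx (List.not_mem_nil))
        (fun x => ⟨fun hx => absurd hx (List.not_mem_nil), fun ⟨rep, hrep, _⟩ => absurd hrep (List.not_mem_nil)⟩)
        (fun rep hrep => absurd hrep (List.not_mem_nil))
        List.Pairwise.nil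
        rfl
    have hA : induced_components rows S =
        ((((PySem.List.sorted S (fun x => x) false).foldl
            (fun (st : PySem.Set String × List Int) start =>
              if PySem.Set.contains st.1 start then st
              else
                let bf := pvBfs (pvAdj rows S) (S.length + 1) [start] (PySem.Set.add st.1 start) 0
                (bf.1, st.2 ++ [bf.2])) (PySem.Set.empty, [])).2.length : Int),
          match PySem.List.max? ((PySem.List.sorted S (fun x => x) false).foldl
            (fun (st : PySem.Set String × List Int) start =>
              if PySem.Set.contains st.1 start then st
              else
                let bf := pvBfs (pvAdj rows S) (S.length + 1) [start] (PySem.Set.add st.1 start) 0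
                (bf.1, st.2 ++ [bf.2])) (PySem.Set.empty, [])).2 (fun x => x) with
          | some m => m
          | none => 0) := by
      unfold induced_components
      rw [hie]
      rfl
    have hcounts : (S.foldl (fun c n => PySem.Dict.modify c ((pvLabel rows S).getD n "") 0 (· + 1))
        PySem.Dict.empty) = PySem.Dict.counter (S.map (pvL rows S)) := by
      rw [PySem.Dict.counter_eq_foldl, List.foldl_map]
      rfl
    have hB : induced_components_alt rows S =
        (if (PySem.Dict.counter (S.map (pvL rows S))).items.isEmpty then ((0 : Int), (0 : Int))
         else (((PySem.Dict.counter (S.map (pvL rows S))).size : Int),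
          match PySem.List.max? (PySem.Dict.counter (S.map (pvL rows S))).values (fun x => x) with
          | some m => m
          | none => 0)) := by
      unfold induced_components_alt
      rw [← hcounts]
    rw [hA, hB]
    -- the image of the label map, as a set
    have hmapne : S.map (pvL rows S) ≠ [] := by
      intro h
      exact hnil (List.map_eq_nil_iff.mp h)
    have himgne : PySem.Set.ofList (S.map (pvL rows S)) ≠ [] := by
      obtain ⟨v, hv⟩ := List.exists_mem_of_ne_nil _ hmapne
      exact List.ne_nil_of_mem ((PySem.Set.mem_ofList _ v).mpr hv)
    have hitems := PySem.Dict.items_counter (S.map (pvL rows S))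
    have hitne : (PySem.Dict.counter (S.map (pvL rows S))).items.isEmpty = false := by
      rw [hitems]
      rw [List.isEmpty_eq_false_iff, ← List.length_pos_iff]
      rw [List.length_map, List.length_pos_iff]
      exact himgne
    rw [hitne]
    simp only [Bool.false_eq_true, if_false]
    -- the representatives' labels enumerate the image exactly once
    have hnd1 : (reps'.map (pvL rows S)).Nodup := by
      have hpw : reps'.Pairwise (fun a b => pvL rows S a ≠ pvL rows S b) :=
        g3.imp_of_mem (fun {a b} ha hb hnc heq => hnc ((hE a (g2 a ha) b (g2 b hb)).mp heq))
      exact List.pairwise_map.mpr hpw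
    have hperm : (reps'.map (pvL rows S)).Perm (PySem.Set.ofList (S.map (pvL rows S))) := by
      rw [List.perm_ext_iff_of_nodup hnd1 (PySem.Set.nodup_ofList _)]
      intro v
      rw [PySem.Set.mem_ofList, List.mem_map, List.mem_map]
      constructor
      · rintro ⟨rep, hrep, rfl⟩
        exact ⟨rep, g2 rep hrep, rfl⟩
      · rintro ⟨n, hn, rfl⟩
        obtain ⟨rep, hrep, hconn⟩ := (g1 n).mp (g5 n ((PySem.List.mem_sorted S _ false n).mpr hn))
        exact ⟨rep, hrep, (hE rep (g2 rep hrep) n hn).mpr hconn⟩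
    have hsize : (PySem.Dict.counter (S.map (pvL rows S))).size = reps'.length := by
      show (PySem.Dict.counter (S.map (pvL rows S))).items.length = reps'.length
      rw [hitems, List.length_map]
      have hl := hperm.length_eq
      rw [List.length_map] at hl
      omega
    have hvals : (PySem.Dict.counter (S.map (pvL rows S))).values
        = (PySem.Set.ofList (S.map (pvL rows S))).map
            (fun k => ((List.count k (S.map (pvL rows S)) : Nat) : Int)) := by
      show (PySem.Dict.counter (S.map (pvL rows S))).items.map Prod.snd = _
      rw [hitems, List.map_map]
      rfl
    have hmm : reps'.map (fun rep => pvCnt rows S (pvL rows S rep))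
        = (reps'.map (pvL rows S)).map (pvCnt rows S) := by
      rw [List.map_map]
      rfl
    have hp2 : (reps'.map (fun rep => pvCnt rows S (pvL rows S rep))).Perm
        ((PySem.Set.ofList (S.map (pvL rows S))).map
          (fun k => ((List.count k (S.map (pvL rows S)) : Nat) : Int))) := by
      rw [hmm]
      exact hperm.map (pvCnt rows S)
    have hm := pvMax?_perm hp2
    rw [g4, hvals, hm, hsize, List.length_map]
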